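-- pv_equiv track=rewrite | github.com/Chenshlomi/scraper | utils/helpers.py | is_valid_animal_name
-- ===== SOURCE A (Python) =====
-- def is_valid_animal_name(name: str) -> bool:
--     """
--     Check if a string appears to be a valid animal name.
--
--     Args:
--         name (str): Name to validate
--
--     Returns:
--         bool: True if the name appears valid
--     """
--     if not name or len(name) < 2:
--         return False
--
--     # Filter out common non-animal entries
--     invalid_terms = [
--         'see also', 'references', 'external links', 'notes',
--         'male', 'female', 'young', 'group', 'adjective'
--     ]
--
--     name_lower = name.lower()
--     return not any(term in name_lower for term in invalid_terms)
-- ===== SOURCE B (Python) =====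
-- def is_valid_animal_name(name: str) -> bool:
--     """Substring-index re-implementation: materialise the set of every window of
--     the lowered name whose width matches some invalid term's length, then decide
--     validity by one set-disjointness test instead of nine per-term scans."""
--     if not name or len(name) < 2:
--         return False
--     invalid_terms = [
--         'see also', 'references', 'external links', 'notes',
--         'male', 'female', 'young', 'group', 'adjective'
--     ]
--     low = name.lower()
--     lengths = {len(t) for t in invalid_terms}
--     windows = {low[i:i + L] for L in lengths for i in range(len(low) - L + 1)}
--     return windows.isdisjoint(invalid_terms)
-- ===== Notes on version B (the rewrite author's own statement) =====
-- stated objective: alternative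
-- what changed: Instead of nine separate substring scans, B builds a hash set of all fixed-width windows of the lowered string (one width per distinct term length) and answers with a single set-disjointness test against the invalid terms.
import Mathlib
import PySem

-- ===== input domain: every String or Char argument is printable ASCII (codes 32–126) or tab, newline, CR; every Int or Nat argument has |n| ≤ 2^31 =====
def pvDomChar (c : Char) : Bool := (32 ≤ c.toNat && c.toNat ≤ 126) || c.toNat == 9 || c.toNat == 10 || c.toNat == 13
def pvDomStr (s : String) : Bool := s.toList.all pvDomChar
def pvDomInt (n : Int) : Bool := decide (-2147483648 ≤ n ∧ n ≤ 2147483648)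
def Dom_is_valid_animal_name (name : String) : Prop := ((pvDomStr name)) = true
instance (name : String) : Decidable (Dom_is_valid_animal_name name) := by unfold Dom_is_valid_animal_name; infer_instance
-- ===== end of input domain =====

-- B replaces the nine per-term substring scans by a set of all fixed-width windows of the
-- lowered string plus one set-disjointness test (objective: alternative data structure).

-- ===== PORT A =====
def is_valid_animal_name (name : String) : Bool :=
  if name = "" ∨ PySem.Str.len name < 2 then false
  else
    let invalid_terms : List String :=
      ["see also", "references", "external links", "notes",
       "male", "female", "young", "group", "adjective"]
    let name_lower := PySem.Str.lower name
    !(invalid_terms.any (fun term => PySem.Str.isIn term name_lower))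

-- ===== PORT B =====
-- The two Python set comprehensions are ported with PySem.Set.ofList; their iteration
-- order is consumed only to build another set / by isdisjoint, which are order-independent.
def is_valid_animal_name_alt (name : String) : Bool :=
  if name = "" ∨ PySem.Str.len name < 2 then false
  else
    let invalid_terms : List String :=
      ["see also", "references", "external links", "notes",
       "male", "female", "young", "group", "adjective"]
    let low := PySem.Str.lower name
    let lengths : PySem.Set Int := PySem.Set.ofList (invalid_terms.map PySem.Str.len)
    let windows : PySem.Set String := PySem.Set.ofList
      (lengths.flatMap (fun L =>
        (PySem.List.pyRange 0 (PySem.Str.len low - L + 1) 1).map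
          (fun i => PySem.Str.slice low (some i) (some (i + L)))))
    PySem.Set.isdisjoint windows invalid_terms

-- ===== PRECONDITION & SPEC =====
def Spec_is_valid_animal_name (name : String) (out : Bool) : Prop := out = is_valid_animal_name_alt name
instance (name : String) (out : Bool) : Decidable (Spec_is_valid_animal_name name out) := by unfold Spec_is_valid_animal_name; infer_instance

-- ===== CLAIM (what is proved, stated in full; the proofs are below) =====
def Claim_equal_is_valid_animal_name : Prop := ∀ (name : String), Dom_is_valid_animal_name name → Spec_is_valid_animal_name name (is_valid_animal_name name)

-- ===== LEMMAS AND PROOFS =====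

-- A nonempty string t whose length occurs in the (nonnegative) length family `lengths`
-- is among the windows of `low` generated for that family iff t is a substring of low.
theorem mem_windows_iff (low t : String) (lengths : List Int)
    (hlen : (t.toList.length : Int) ∈ lengths) (hpos : ∀ L ∈ lengths, 0 ≤ L)
    (hne : t.toList ≠ []) :
    (t ∈ lengths.flatMap (fun L =>
        (PySem.List.pyRange 0 (PySem.Str.len low - L + 1) 1).map
          (fun i => PySem.Str.slice low (some i) (some (i + L)))))
      ↔ PySem.Str.isIn t low = true := by
  rw [List.mem_flatMap]
  have hisin : PySem.Str.isIn t low = PySem.Chars.isIn t.toList low.toList := by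
    simp [pysem]
  rw [hisin, ← PySem.Chars.exists_prefix_drop_iff_isIn]
  constructor
  · rintro ⟨L, hL, hmem⟩
    rcases List.mem_map.mp hmem with ⟨i, hi, hslice⟩
    rcases PySem.List.mem_pyRange_one.mp hi with ⟨h0, _⟩
    obtain ⟨j, rfl⟩ : ∃ j : Nat, i = (j : Int) := ⟨i.toNat, (Int.toNat_of_nonneg h0).symm⟩
    obtain ⟨n, rfl⟩ : ∃ n : Nat, L = (n : Int) :=
      ⟨L.toNat, (Int.toNat_of_nonneg (hpos L hL)).symm⟩
    refine ⟨j, ?_⟩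
    have : t.toList = List.take n (List.drop j low.toList) := by
      rw [← hslice, PySem.Str.toList_slice, PySem.Chars.slice_eq_listSlice,
        PySem.List.slice_natCast_add]
    rw [this]
    exact List.take_prefix _ _
  · rintro ⟨j, hpre⟩
    have hlelen : t.toList.length ≤ low.toList.length - j := by
      have := hpre.length_le
      simpa using this
    have hjle : j + t.toList.length ≤ low.toList.length := by
      by_cases hj : j ≤ low.toList.length
      · omega
      · exfalso
        have : List.drop j low.toList = [] := List.drop_eq_nil_of_le (by omega)
        rw [this] at hpre
        exact hne (List.prefix_nil.mp hpre)
    have ht1 : 1 ≤ t.toList.length := by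
      cases h : t.toList with
      | nil => exact absurd h hne
      | cons a l => simp
    refine ⟨(t.toList.length : Int), hlen, List.mem_map.mpr ⟨(j : Int), ?_, ?_⟩⟩
    · rw [PySem.List.mem_pyRange_one]
      have hlow : PySem.Str.len low = (low.toList.length : Int) := by simp [pysem]
      refine ⟨Int.natCast_nonneg j, ?_⟩
      rw [hlow]; omega
    · apply String.toList_inj.mp
      rw [PySem.Str.toList_slice, PySem.Chars.slice_eq_listSlice,
        PySem.List.slice_natCast_add]
      exact (List.prefix_iff_eq_take.mp hpre).symm

-- ===== VERDICT (by name: the statement is the Claim_ definition above) =====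
theorem is_valid_animal_name_spec : Claim_equal_is_valid_animal_name := by
  intro name _
  unfold Spec_is_valid_animal_name is_valid_animal_name is_valid_animal_name_alt
  by_cases hg : name = "" ∨ PySem.Str.len name < 2
  · rw [if_pos hg, if_pos hg]
  · rw [if_neg hg, if_neg hg]
    dsimp only
    set terms : List String :=
      ["see also", "references", "external links", "notes",
       "male", "female", "young", "group", "adjective"] with hterms
    set low := PySem.Str.lower name with hlow
    have hne : ∀ t ∈ terms, t.toList ≠ [] := by rw [hterms]; decide
    have hpos : ∀ L ∈ PySem.Set.ofList (terms.map PySem.Str.len), 0 ≤ L := by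
      rw [hterms]; decide
    have hmem : ∀ t ∈ terms,
        ((t ∈ PySem.Set.ofList ((PySem.Set.ofList (terms.map PySem.Str.len)).flatMap
            (fun L => (PySem.List.pyRange 0 (PySem.Str.len low - L + 1) 1).map
              (fun i => PySem.Str.slice low (some i) (some (i + L)))))) ↔
          PySem.Str.isIn t low = true) := by
      intro t ht
      rw [PySem.Set.mem_ofList]
      apply mem_windows_iff low t _ _ hpos (hne t ht)
      have hsl : PySem.Str.len t = (t.toList.length : Int) := by simp [pysem]
      exact (PySem.Set.mem_ofList _ _).mpr (hsl ▸ List.mem_map_of_mem ht)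
    rw [Bool.eq_iff_iff, PySem.Set.isdisjoint_iff, Bool.not_eq_true', List.any_eq_false]
    constructor
    · intro h x hx hxterms
      exact h x hxterms ((hmem x hxterms).mp hx)
    · intro h x hxterms hf
      exact h x ((hmem x hxterms).mpr hf) hxterms
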